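-- pv_equiv track=rewrite | github.com/cookiy/leetcode_solution_python | hard/336-palindromePairs.py | get_palindrome_parts
-- ===== SOURCE A (Python) =====
-- def get_palindrome_parts(str):
--     pre,suf = [],[]
--     lenstr = len(str)
--     for i in range(0,lenstr + 1):
--         #前缀是回文,包括单词本身
--         if str[:i] == str[:i][::-1]:
--             pre.append(str[i:][::-1])
--         #后缀是回文,包括单词本身
--         if str[i:] == str[i:][::-1]:
--             suf.append(str[:i][::-1])
--     return pre,suf
-- ===== SOURCE B (Python) =====
-- def get_palindrome_parts(str):
--     # rolling exact base-131 numbers: a block is a palindrome iff its forward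
--     # number equals its backward number (digits = char codes < 131 on ASCII input)
--     BASE = 131
--     n = len(str)
--     r = str[::-1]
--
--     def pal_prefix_flags(s):
--         # flags[i] == True  iff  s[:i] is a palindrome
--         flags = [True]
--         fwd = bwd = 0
--         pw = 1
--         for c in s:
--             o = ord(c)
--             fwd = fwd * BASE + o
--             bwd = bwd + o * pw
--             pw *= BASE
--             flags.append(fwd == bwd)
--         return flags
--
--     p = pal_prefix_flags(str)      # p[i]: str[:i] palindrome
--     q = pal_prefix_flags(r)        # q[k]: r[:k] palindrome, i.e. str[n-k:] palindrome
--     pre = [r[:n - i] for i in range(n + 1) if p[i]]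
--     suf = [r[n - i:] for i in range(n + 1) if q[n - i]]
--     return pre, suf
-- ===== Notes on version B (the rewrite author's own statement) =====
-- stated objective: alternative
-- what changed: B replaces A's per-split slice-and-reverse palindrome tests (quadratic comparisons) by a single rolling pass computing exact base-131 forward/backward numbers of each prefix of the string and of its reverse, so each split point is classified by one integer comparison; the outputs are then read off the shared reversed string.
import Mathlib
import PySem

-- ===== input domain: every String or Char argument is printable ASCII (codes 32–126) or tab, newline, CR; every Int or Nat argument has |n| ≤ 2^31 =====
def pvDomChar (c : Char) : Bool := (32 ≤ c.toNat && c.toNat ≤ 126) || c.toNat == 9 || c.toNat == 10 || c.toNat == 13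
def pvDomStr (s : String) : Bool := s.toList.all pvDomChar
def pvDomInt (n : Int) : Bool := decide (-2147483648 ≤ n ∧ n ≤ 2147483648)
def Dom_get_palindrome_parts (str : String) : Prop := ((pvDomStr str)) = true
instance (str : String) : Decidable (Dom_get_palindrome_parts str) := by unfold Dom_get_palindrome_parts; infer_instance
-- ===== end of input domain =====

-- B replaces the per-split slice/reverse palindrome tests by one rolling pass of exact
-- base-131 forward/backward prefix numbers (one integer comparison per split point).

-- ===== PORT A =====
def get_palindrome_parts (str : String) : List String × List String :=
  let lenstr : Int := PySem.Str.len str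
  (PySem.List.pyRange 0 (lenstr + 1) 1).foldl
    (fun (st : List String × List String) i =>
      let pre :=
        if PySem.Str.slice str none (some i)
            = (PySem.Str.slice? (PySem.Str.slice str none (some i)) none none (-1)).getD "" then
          st.1 ++ [(PySem.Str.slice? (PySem.Str.slice str (some i) none) none none (-1)).getD ""]
        else st.1
      let suf :=
        if PySem.Str.slice str (some i) none
            = (PySem.Str.slice? (PySem.Str.slice str (some i) none) none none (-1)).getD "" then
          st.2 ++ [(PySem.Str.slice? (PySem.Str.slice str none (some i)) none none (-1)).getD ""]
        else st.2
      (pre, suf))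
    ([], [])

-- ===== PORT B =====
-- pal_prefix_flags of Source B: flags[i] = (forward base-131 number of s[:i] = backward number)
def pvPalFlags (s : String) : List Bool :=
  (s.toList.foldl
    (fun (st : List Bool × Int × Int × Int) c =>
      let o : Int := (c.toNat : Int)
      let fwd := st.2.1 * 131 + o
      let bwd := st.2.2.1 + o * st.2.2.2
      let pw := st.2.2.2 * 131
      (st.1 ++ [decide (fwd = bwd)], fwd, bwd, pw))
    ([true], 0, 0, 1)).1

def get_palindrome_parts_alt (str : String) : List String × List String :=
  let n : Int := PySem.Str.len str
  let r : String := (PySem.Str.slice? str none none (-1)).getD ""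
  let p := pvPalFlags str
  let q := pvPalFlags r
  let pre := ((PySem.List.pyRange 0 (n + 1) 1).filter
      (fun i => PySem.List.pyGetD p i false)).map
      (fun i => PySem.Str.slice r none (some (n - i)))
  let suf := ((PySem.List.pyRange 0 (n + 1) 1).filter
      (fun i => PySem.List.pyGetD q (n - i) false)).map
      (fun i => PySem.Str.slice r (some (n - i)) none)
  (pre, suf)

-- ===== PRECONDITION & SPEC =====
def Spec_get_palindrome_parts (str : String) (out : List String × List String) : Prop := out = get_palindrome_parts_alt str
instance (str : String) (out : List String × List String) : Decidable (Spec_get_palindrome_parts str out) := by unfold Spec_get_palindrome_parts; infer_instance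

-- ===== CLAIM (what is proved, stated in full; the proofs are below) =====
def Claim_equal_get_palindrome_parts : Prop := ∀ (str : String), Dom_get_palindrome_parts str → Spec_get_palindrome_parts str (get_palindrome_parts str)


-- ===== LEMMAS AND PROOFS =====

-- value of a digit list read forward, base 131
def pvVal (ds : List Int) : Int := ds.foldl (fun a d => a * 131 + d) 0

-- the loop body of pal_prefix_flags, as a named function (proof helper)
def pvStep (st : List Bool × Int × Int × Int) (c : Char) : List Bool × Int × Int × Int :=
  (st.1 ++ [decide (st.2.1 * 131 + (c.toNat : Int) = st.2.2.1 + (c.toNat : Int) * st.2.2.2)],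
   st.2.1 * 131 + (c.toNat : Int), st.2.2.1 + (c.toNat : Int) * st.2.2.2, st.2.2.2 * 131)

theorem pvPalFlags_def (s : String) :
    pvPalFlags s = (s.toList.foldl pvStep ([true], 0, 0, 1)).1 := rfl

theorem pvVal_shift (ds : List Int) (a : Int) :
    ds.foldl (fun a d => a * 131 + d) a = a * 131 ^ ds.length + pvVal ds := by
  induction ds generalizing a with
  | nil => simp [pvVal]
  | cons d ds ih =>
      have h1 := ih (a * 131 + d)
      have h2 := ih (0 * 131 + d)
      simp only [pvVal, List.foldl_cons, List.length_cons] at *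
      rw [h1, h2]
      ring

theorem pvVal_cons (d : Int) (ds : List Int) :
    pvVal (d :: ds) = d * 131 ^ ds.length + pvVal ds := by
  have h := pvVal_shift ds (0 * 131 + d)
  simp only [pvVal, List.foldl_cons] at *
  rw [h]
  ring

theorem pvVal_append_singleton (ds : List Int) (d : Int) :
    pvVal (ds ++ [d]) = pvVal ds * 131 + d := by
  simp [pvVal, List.foldl_append]

theorem pvVal_nonneg (ds : List Int) (h : ∀ d ∈ ds, 0 ≤ d) : 0 ≤ pvVal ds := by
  induction ds with
  | nil => simp [pvVal]
  | cons d ds ih =>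
      rw [pvVal_cons]
      have h1 : 0 ≤ d := h d (by simp)
      have h2 : 0 ≤ pvVal ds := ih (fun x hx => h x (by simp [hx]))
      positivity

theorem pvVal_lt (ds : List Int) (h : ∀ d ∈ ds, d < 131) (h0 : ∀ d ∈ ds, 0 ≤ d) :
    pvVal ds < 131 ^ ds.length := by
  induction ds with
  | nil => simp [pvVal]
  | cons d ds ih =>
      rw [pvVal_cons]
      have h1 : d < 131 := h d (by simp)
      have h2 : pvVal ds < 131 ^ ds.length := ih (fun x hx => h x (by simp [hx])) (fun x hx => h0 x (by simp [hx]))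
      have hP : (0:Int) ≤ 131 ^ ds.length := by positivity
      have h3 : d * 131 ^ ds.length ≤ 130 * 131 ^ ds.length := by nlinarith
      calc d * 131 ^ ds.length + pvVal ds ≤ 130 * 131 ^ ds.length + pvVal ds := by omega
    _ < 130 * 131 ^ ds.length + 131 ^ ds.length := by omega
    _ = 131 ^ (ds.length + 1) := by ring
    _ = 131 ^ (d :: ds).length := by simp

theorem pvVal_inj (ds es : List Int) (hlen : ds.length = es.length)
    (hd1 : ∀ d ∈ ds, 0 ≤ d) (hd2 : ∀ d ∈ ds, d < 131)
    (he1 : ∀ d ∈ es, 0 ≤ d) (he2 : ∀ d ∈ es, d < 131)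
    (h : pvVal ds = pvVal es) : ds = es := by
  induction ds generalizing es with
  | nil =>
      cases es with
      | nil => rfl
      | cons e es => simp at hlen
  | cons d ds ih =>
      cases es with
      | nil => simp at hlen
      | cons e es =>
          simp only [List.length_cons, Nat.add_right_cancel_iff] at hlen
          rw [pvVal_cons, pvVal_cons, hlen] at h
          have b1 : 0 ≤ pvVal ds := pvVal_nonneg ds (fun x hx => hd1 x (by simp [hx]))
          have b2 : pvVal ds < 131 ^ es.length := by
            rw [← hlen]
            exact pvVal_lt ds (fun x hx => hd2 x (by simp [hx])) (fun x hx => hd1 x (by simp [hx]))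
          have b3 : 0 ≤ pvVal es := pvVal_nonneg es (fun x hx => he1 x (by simp [hx]))
          have b4 : pvVal es < 131 ^ es.length :=
            pvVal_lt es (fun x hx => he2 x (by simp [hx])) (fun x hx => he1 x (by simp [hx]))
          have hde : d = e := by
            by_contra hne
            have hP : (0:Int) < 131 ^ es.length := by positivity
            rcases lt_or_gt_of_ne hne with hlt | hgt
            · have : (d + 1) * 131 ^ es.length ≤ e * 131 ^ es.length :=
                mul_le_mul_of_nonneg_right (by omega) (le_of_lt hP)
              nlinarith
            · have : (e + 1) * 131 ^ es.length ≤ d * 131 ^ es.length :=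
                mul_le_mul_of_nonneg_right (by omega) (le_of_lt hP)
              nlinarith
          subst hde
          have htail : pvVal ds = pvVal es := by omega
          have := ih es hlen (fun x hx => hd1 x (by simp [hx])) (fun x hx => hd2 x (by simp [hx]))
            (fun x hx => he1 x (by simp [hx])) (fun x hx => he2 x (by simp [hx])) htail
          rw [this]

def pvDigits (l : List Char) : List Int := l.map (fun c => (c.toNat : Int))

theorem pvDigits_bounds (l : List Char) (hb : ∀ c ∈ l, c.toNat < 131) :
    (∀ d ∈ pvDigits l, 0 ≤ d) ∧ (∀ d ∈ pvDigits l, d < 131) := by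
  constructor
  · intro d hd
    simp only [pvDigits, List.mem_map] at hd
    obtain ⟨c, _, rfl⟩ := hd
    positivity
  · intro d hd
    simp only [pvDigits, List.mem_map] at hd
    obtain ⟨c, hc, rfl⟩ := hd
    exact_mod_cast hb c hc

-- fwd = bwd at a prefix iff that prefix is a palindrome (digits < 131)
theorem pvVal_rev_iff (l : List Char) (hb : ∀ c ∈ l, c.toNat < 131) :
    (pvVal (pvDigits l) = pvVal (pvDigits l.reverse)) ↔ l = l.reverse := by
  constructor
  · intro h
    have hb' : ∀ c ∈ l.reverse, c.toNat < 131 := fun c hc => hb c (List.mem_reverse.mp hc)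
    obtain ⟨p1, p2⟩ := pvDigits_bounds l hb
    obtain ⟨q1, q2⟩ := pvDigits_bounds l.reverse hb'
    have hlen : (pvDigits l).length = (pvDigits l.reverse).length := by simp [pvDigits]
    have hmap := pvVal_inj _ _ hlen p1 p2 q1 q2 h
    refine List.map_injective_iff.mpr (fun a b hab => ?_) hmap
    have h3 : a.toNat = b.toNat := by exact_mod_cast hab
    calc a = Char.ofNat a.toNat := (Char.ofNat_toNat a).symm
      _ = Char.ofNat b.toNat := by rw [h3]
      _ = b := Char.ofNat_toNat b
  · intro h
    rw [← h]

-- the fold of pal_prefix_flags, characterized: one flag per processed prefix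
theorem pvFlags_fold (rest pfx : List Char) (acc : List Bool)
    (hb : ∀ c ∈ pfx ++ rest, c.toNat < 131) :
    (rest.foldl pvStep
      (acc, pvVal (pvDigits pfx), pvVal (pvDigits pfx.reverse), 131 ^ pfx.length)).1
    = acc ++ (List.range rest.length).map
        (fun k => decide (pfx ++ rest.take (k+1) = (pfx ++ rest.take (k+1)).reverse)) := by
  induction rest generalizing pfx acc with
  | nil => simp
  | cons c rest ih =>
      have hfwd : pvVal (pvDigits pfx) * 131 + (c.toNat : Int) = pvVal (pvDigits (pfx ++ [c])) := by
        simp [pvDigits, pvVal_append_singleton]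
      have hbwd : pvVal (pvDigits pfx.reverse) + (c.toNat : Int) * 131 ^ pfx.length
          = pvVal (pvDigits (pfx ++ [c]).reverse) := by
        simp only [List.reverse_append, List.reverse_cons, List.reverse_nil, List.nil_append,
          List.cons_append, pvDigits, List.map_cons]
        rw [pvVal_cons]
        simp
        ring
      have hpw : (131:Int) ^ pfx.length * 131 = 131 ^ (pfx ++ [c]).length := by
        simp [pow_succ]
      have hb' : ∀ x ∈ (pfx ++ [c]) ++ rest, x.toNat < 131 := by
        intro x hx
        apply hb
        simp at hx ⊢
        tauto
      have step := ih (pfx ++ [c])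
        (acc ++ [decide (pvVal (pvDigits (pfx ++ [c])) = pvVal (pvDigits (pfx ++ [c]).reverse))]) hb'
      rw [List.foldl_cons]
      rw [show pvStep (acc, pvVal (pvDigits pfx), pvVal (pvDigits pfx.reverse), 131 ^ pfx.length) c
          = (acc ++ [decide (pvVal (pvDigits (pfx ++ [c])) = pvVal (pvDigits (pfx ++ [c]).reverse))],
             pvVal (pvDigits (pfx ++ [c])), pvVal (pvDigits (pfx ++ [c]).reverse),
             131 ^ (pfx ++ [c]).length) from by
        simp only [pvStep]
        rw [hfwd, hbwd, hpw]]
      rw [step]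
      have hiff : pvVal (pvDigits (pfx ++ [c])) = pvVal (pvDigits (pfx ++ [c]).reverse)
          ↔ pfx ++ [c] = (pfx ++ [c]).reverse := by
        apply pvVal_rev_iff
        intro x hx
        apply hb
        simp at hx ⊢
        tauto
      simp only [List.length_cons, List.range_succ_eq_map, List.map_cons, List.map_map,
        List.append_assoc, List.singleton_append]
      congr 1
      congr 1
      simp
      rw [show (c :: pfx.reverse) = (pfx ++ [c]).reverse from by simp]
      exact hiff

-- pal_prefix_flags as a table of palindromic-prefix tests
theorem pvPalFlags_eq (s : String) (hb : ∀ c ∈ s.toList, c.toNat < 131) :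
    pvPalFlags s = (List.range (s.toList.length + 1)).map
      (fun k => decide (s.toList.take k = (s.toList.take k).reverse)) := by
  rw [pvPalFlags_def]
  have h0 : (([true], (0:Int), (0:Int), (1:Int)) : List Bool × Int × Int × Int)
      = ([true], pvVal (pvDigits ([] : List Char)), pvVal (pvDigits ([] : List Char).reverse),
         131 ^ ([] : List Char).length) := by
    simp [pvVal, pvDigits]
  rw [h0, pvFlags_fold s.toList [] [true] (by simpa using hb)]
  rw [List.range_succ_eq_map]
  simp [Function.comp]

-- a two-list accumulating loop with guarded appends = a pair of filter+map
theorem pvFoldPair (l : List Int) (P Q : Int → Prop) [DecidablePred P] [DecidablePred Q]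
    (f g : Int → String) (a b : List String) :
    l.foldl (fun (st : List String × List String) x =>
      (if P x then st.1 ++ [f x] else st.1, if Q x then st.2 ++ [g x] else st.2)) (a, b)
    = (a ++ (l.filter (fun x => decide (P x))).map f,
       b ++ (l.filter (fun x => decide (Q x))).map g) := by
  induction l generalizing a b with
  | nil => simp
  | cons x l ih =>
      simp only [List.foldl_cons, List.filter_cons]
      by_cases hP : P x <;> by_cases hQ : Q x <;>
        simp [hP, hQ, ih]

theorem pvGetD_map_range {α : Type} (f : Nat → α) (N k : Nat) (h : k < N) (d : α) :
    ((List.range N).map f).getD k d = f k := by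
  rw [List.getD_eq_getElem?_getD, List.getElem?_map, List.getElem?_range h]
  rfl

-- filter+map lists agree when predicates and values agree pointwise on the base list
theorem pvFMcongr {l : List Int} {p q : Int → Bool} {f g : Int → String}
    (hpq : ∀ x ∈ l, p x = q x) (hfg : ∀ x ∈ l, f x = g x) :
    (l.filter p).map f = (l.filter q).map g := by
  rw [← List.filter_congr hpq]
  apply List.map_congr_left
  intro x hx
  exact hfg x (List.mem_of_mem_filter hx)

-- the heart: both programs compute the same pair, given all char codes < 131
theorem pvMain (str : String) (hb : ∀ c ∈ str.toList, c.toNat < 131) :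
    get_palindrome_parts str = get_palindrome_parts_alt str := by
  have hbr : ∀ c ∈ str.toList.reverse, c.toNat < 131 := fun c hc => hb c (List.mem_reverse.mp hc)
  have hA := pvFoldPair (PySem.List.pyRange 0 (PySem.Str.len str + 1) 1)
      (fun i => PySem.Str.slice str none (some i)
        = (PySem.Str.slice? (PySem.Str.slice str none (some i)) none none (-1)).getD "")
      (fun i => PySem.Str.slice str (some i) none
        = (PySem.Str.slice? (PySem.Str.slice str (some i) none) none none (-1)).getD "")
      (fun i => (PySem.Str.slice? (PySem.Str.slice str (some i) none) none none (-1)).getD "")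
      (fun i => (PySem.Str.slice? (PySem.Str.slice str none (some i)) none none (-1)).getD "")
      [] []
  rw [List.nil_append, List.nil_append] at hA
  refine Eq.trans (show get_palindrome_parts str = _ from hA) ?_
  have hr : (PySem.Str.slice? str none none (-1)).getD ""
      = String.ofList str.toList.reverse := by
    rw [PySem.Str.slice?_none_none_neg_one, Option.getD_some]
  have hrl : (String.ofList str.toList.reverse).toList = str.toList.reverse :=
    String.toList_ofList
  have hlen : PySem.Str.len str = (str.toList.length : Int) := PySem.Str.len_eq str
  have hpflags := pvPalFlags_eq str hb
  have hqflags := pvPalFlags_eq (String.ofList str.toList.reverse) (by rw [hrl]; exact hbr)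
  rw [hrl] at hqflags
  simp only [List.length_reverse] at hqflags
  simp only [get_palindrome_parts_alt, hr, hlen]
  simp only [Prod.mk.injEq]
  constructor
  · -- pre
    apply pvFMcongr
    · intro i hi
      rw [PySem.List.mem_pyRange_one] at hi
      lift i to ℕ using hi.1 with k
      have hk : k ≤ str.toList.length := by
        have := hi.2
        omega
      have hS : (PySem.Str.slice str none (some ((k : Nat) : Int))).toList
          = str.toList.take k := by
        rw [PySem.Str.toList_slice, PySem.Chars.slice_eq_listSlice, PySem.List.slice_to_natCast]
      rw [PySem.Str.slice?_none_none_neg_one, Option.getD_some, PySem.List.pyGetD_natCast,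
        hpflags, pvGetD_map_range _ _ _ (by omega)]
      apply decide_eq_decide.mpr
      rw [← String.toList_inj, String.toList_ofList, hS]
    · intro i hi
      rw [PySem.List.mem_pyRange_one] at hi
      lift i to ℕ using hi.1 with k
      have hk : k ≤ str.toList.length := by
        have := hi.2
        omega
      rw [PySem.Str.slice?_none_none_neg_one, Option.getD_some, ← String.toList_inj,
        String.toList_ofList, PySem.Str.toList_slice, PySem.Chars.slice_eq_listSlice,
        PySem.List.slice_from_natCast, PySem.Str.toList_slice, PySem.Chars.slice_eq_listSlice,
        hrl]
      rw [show ((str.toList.length : Int) - (k : Int)) = ((str.toList.length - k : Nat) : Int) by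
        omega]
      rw [PySem.List.slice_to_natCast]
      exact List.reverse_drop
  · -- suf
    apply pvFMcongr
    · intro i hi
      rw [PySem.List.mem_pyRange_one] at hi
      lift i to ℕ using hi.1 with k
      have hk : k ≤ str.toList.length := by
        have := hi.2
        omega
      have hS : (PySem.Str.slice str (some ((k : Nat) : Int)) none).toList
          = str.toList.drop k := by
        rw [PySem.Str.toList_slice, PySem.Chars.slice_eq_listSlice, PySem.List.slice_from_natCast]
      rw [show ((str.toList.length : Int) - (k : Int)) = ((str.toList.length - k : Nat) : Int) by
        omega]
      rw [PySem.Str.slice?_none_none_neg_one, Option.getD_some, PySem.List.pyGetD_natCast,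
        hqflags, pvGetD_map_range _ _ _ (by omega), ← List.reverse_drop]
      apply decide_eq_decide.mpr
      rw [← String.toList_inj, String.toList_ofList, hS, List.reverse_reverse]
      exact eq_comm
    · intro i hi
      rw [PySem.List.mem_pyRange_one] at hi
      lift i to ℕ using hi.1 with k
      have hk : k ≤ str.toList.length := by
        have := hi.2
        omega
      rw [PySem.Str.slice?_none_none_neg_one, Option.getD_some, ← String.toList_inj,
        String.toList_ofList, PySem.Str.toList_slice, PySem.Chars.slice_eq_listSlice,
        PySem.List.slice_to_natCast, PySem.Str.toList_slice, PySem.Chars.slice_eq_listSlice,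
        hrl]
      rw [show ((str.toList.length : Int) - (k : Int)) = ((str.toList.length - k : Nat) : Int) by
        omega]
      rw [PySem.List.slice_from_natCast]
      exact List.reverse_take

-- ===== VERDICT (by name: the statement is the Claim_ definition above) =====
theorem get_palindrome_parts_spec : Claim_equal_get_palindrome_parts := by
  intro str hdom
  have hb : ∀ c ∈ str.toList, c.toNat < 131 := by
    intro c hc
    unfold Dom_get_palindrome_parts pvDomStr at hdom
    rw [List.all_eq_true] at hdom
    have h := hdom c hc
    unfold pvDomChar at h
    simp at h
    omega
  unfold Spec_get_palindrome_parts
  exact pvMain str hb
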